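-- pv_equiv track=rewrite | github.com/Anik422/CPS-Academy | codechef/contest/Division 4/Even Sum Subarray.py | largest_even_sum_subarray
-- ===== SOURCE A (Python) =====
-- def largest_even_sum_subarray(arr):
--     total_sum = sum(arr)
--     if total_sum % 2 == 0:
--         return len(arr)
--
--     odd_positions = [i for i, num in enumerate(arr) if num % 2 != 0]
--
--     if len(odd_positions) == 0:
--         return 0
--
--
--     first_odd_position = odd_positions[0]
--     last_odd_position = odd_positions[-1]
--
--
--     remove_prefix_length = first_odd_position + 1
--     remove_suffix_length = len(arr) - last_odd_position
--
--     return max(len(arr) - remove_prefix_length, len(arr) - remove_suffix_length)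
-- ===== SOURCE B (Python) =====
-- def largest_even_sum_subarray(arr):
--     p = 0
--     first_seen = {0: 0}
--     ans = 0
--     i = 0
--     for x in arr:
--         i += 1
--         p = (p + x) % 2
--         if p in first_seen:
--             ans = max(ans, i - first_seen[p])
--         else:
--             first_seen[p] = i
--     return ans
-- ===== Notes on version B (the rewrite author's own statement) =====
-- stated objective: alternative
-- what changed: Replaced the total-sum/odd-position-list case analysis by a single prefix-parity scan with a first-seen-parity table (the classic longest-subarray-with-given-sum-property technique).
import Mathlib
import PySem

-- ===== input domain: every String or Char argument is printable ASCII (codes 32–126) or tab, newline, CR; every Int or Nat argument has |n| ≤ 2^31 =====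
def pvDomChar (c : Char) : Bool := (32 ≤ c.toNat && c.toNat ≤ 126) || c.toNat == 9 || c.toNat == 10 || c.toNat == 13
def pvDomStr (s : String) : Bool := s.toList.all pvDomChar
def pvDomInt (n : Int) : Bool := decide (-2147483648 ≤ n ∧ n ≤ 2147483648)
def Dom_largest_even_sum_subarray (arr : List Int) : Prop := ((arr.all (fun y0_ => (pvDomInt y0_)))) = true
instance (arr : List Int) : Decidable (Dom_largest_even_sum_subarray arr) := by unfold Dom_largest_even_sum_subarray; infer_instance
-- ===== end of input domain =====

-- B replaces A's total-sum / odd-position-list case analysis by a single prefix-parity scan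
-- with a first-seen-parity table (objective: alternative algorithm, same O(n) cost).

-- ===== PORT A =====
def largest_even_sum_subarray (arr : List Int) : Int :=
  let total_sum := arr.foldl (· + ·) 0
  if PySem.Int.mod total_sum 2 = 0 then (arr.length : Int)
  else
    let odd_positions := ((PySem.List.enumerate arr 0).filter (fun p => PySem.Int.mod p.2 2 != 0)).map (·.1)
    if odd_positions.length = 0 then 0
    else
      let first_odd_position := odd_positions.headD 0
      let last_odd_position := odd_positions.getLastD 0
      let remove_prefix_length := first_odd_position + 1
      let remove_suffix_length := (arr.length : Int) - last_odd_position
      max ((arr.length : Int) - remove_prefix_length) ((arr.length : Int) - remove_suffix_length)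

-- ===== PORT B =====
def largest_even_sum_subarray_alt (arr : List Int) : Int :=
  let st := arr.foldl
    (fun (st : Int × PySem.Dict Int Int × Int × Int) x =>
      let i := st.2.2.2 + 1
      let p := PySem.Int.mod (st.1 + x) 2
      if st.2.1.contains p then (p, st.2.1, max st.2.2.1 (i - st.2.1.getD p 0), i)
      else (p, st.2.1.insert p i, st.2.2.1, i))
    (0, PySem.Dict.empty.insert 0 0, 0, 0)
  st.2.2.1

-- ===== PRECONDITION & SPEC =====
def Spec_largest_even_sum_subarray (arr : List Int) (out : Int) : Prop := out = largest_even_sum_subarray_alt arr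
instance (arr : List Int) (out : Int) : Decidable (Spec_largest_even_sum_subarray arr out) := by unfold Spec_largest_even_sum_subarray; infer_instance

-- ===== CLAIM (what is proved, stated in full; the proofs are below) =====
def Claim_equal_largest_even_sum_subarray : Prop := ∀ (arr : List Int), Dom_largest_even_sum_subarray arr → Spec_largest_even_sum_subarray arr (largest_even_sum_subarray arr)

-- ===== LEMMAS AND PROOFS =====

lemma pvmod2 (a : Int) : PySem.Int.mod a 2 = a % 2 :=
  PySem.Int.mod_eq_emod_of_pos (by norm_num)

/-- Abstract state of B's loop: (running parity, first index stored for parity 1, answer). -/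
def pvStep (st : Int × Option Int × Int) (i x : Int) : Int × Option Int × Int :=
  let p := (st.1 + x) % 2
  if p = 0 then (p, st.2.1, max st.2.2 i)
  else
    match st.2.1 with
    | some m => (p, some m, max st.2.2 (i - m))
    | none => (p, some i, st.2.2)

def pvLoop : List Int → Int → (Int × Option Int × Int) → Int × Option Int × Int
  | [], _, st => st
  | x :: r, i, st => pvLoop r (i + 1) (pvStep st i x)

/-- The dictionary shapes B's loop can reach. -/
def pvDictOf : Option Int → PySem.Dict Int Int
  | none => PySem.Dict.empty.insert 0 0
  | some m => (PySem.Dict.empty.insert 0 0).insert 1 m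

/-- Indices (Python enumerate indices, from `i`) of the odd elements. -/
def pvOddIdx : List Int → Int → List Int
  | [], _ => []
  | x :: r, i => if x % 2 = 1 then i :: pvOddIdx r (i + 1) else pvOddIdx r (i + 1)

lemma pvOddIdx_eq_port (l : List Int) (i : Int) :
    ((PySem.List.enumerate l i).filter (fun p => p.2 % 2 != 0)).map (·.1) = pvOddIdx l i := by
  induction l generalizing i with
  | nil => simp [pvOddIdx, PySem.List.enumerate_nil]
  | cons x r ih =>
    rw [PySem.List.enumerate_cons]
    rcases (show x % 2 = 0 ∨ x % 2 = 1 by omega) with h | h <;>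
      simp [h, pvOddIdx, ih]

lemma pvOddIdx_append (l : List Int) (x : Int) (i : Int) :
    pvOddIdx (l ++ [x]) i
      = pvOddIdx l i ++ (if x % 2 = 1 then [i + (l.length : Int)] else []) := by
  induction l generalizing i with
  | nil => by_cases h : x % 2 = 1 <;> simp [pvOddIdx, h]
  | cons y r ih =>
    by_cases h : y % 2 = 1 <;>
      simp [pvOddIdx, h, ih, add_comm, add_left_comm]

lemma pvOddIdx_bounds (l : List Int) (i : Int) :
    ∀ j ∈ pvOddIdx l i, i ≤ j ∧ j < i + (l.length : Int) := by
  induction l generalizing i with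
  | nil => simp [pvOddIdx]
  | cons x r ih =>
    intro j hj
    have hlen : ((x :: r).length : Int) = (r.length : Int) + 1 := by
      simp [List.length_cons]
    by_cases h : x % 2 = 1 <;> simp only [pvOddIdx, h, ite_true, ite_false,
      List.mem_cons] at hj
    · rcases hj with rfl | hj
      · rw [hlen]
        have : (0:Int) ≤ (r.length : Int) := by positivity
        omega
      · have := ih (i + 1) j hj
        rw [hlen]; omega
    · have := ih (i + 1) j hj
      rw [hlen]; omega

lemma pvOddIdx_nil_sum (l : List Int) (i : Int) (h : pvOddIdx l i = []) : l.sum % 2 = 0 := by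
  induction l generalizing i with
  | nil => simp
  | cons x r ih =>
    by_cases hx : x % 2 = 1
    · simp [pvOddIdx, hx] at h
    · simp only [pvOddIdx, hx, ite_false] at h
      have hr := ih (i + 1) h
      simp only [List.sum_cons]
      omega

lemma pvLoop_append (l : List Int) (x : Int) (i : Int) (st : Int × Option Int × Int) :
    pvLoop (l ++ [x]) i st = pvStep (pvLoop l i st) (i + (l.length : Int)) x := by
  induction l generalizing i st with
  | nil => simp [pvLoop]
  | cons y r ih =>
    simp only [List.cons_append, pvLoop, ih]
    congr 1
    simp [List.length_cons]
    ring

/-- Closed form of B's loop state after scanning `l` from the initial state. -/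
def pvSpecState (l : List Int) : Int × Option Int × Int :=
  (l.sum % 2,
   ((pvOddIdx l 0).head?).map (· + 1),
   if l.sum % 2 = 0 then (l.length : Int)
   else
     match (pvOddIdx l 0).head?, (pvOddIdx l 0).getLast? with
     | some f, some L => max ((l.length : Int) - f - 1) L
     | _, _ => 0)

lemma pvSpecState_cons (l : List Int) (f L : Int)
    (hh : (pvOddIdx l 0).head? = some f) (hl : (pvOddIdx l 0).getLast? = some L) :
    pvSpecState l = (l.sum % 2, some (f + 1),
      if l.sum % 2 = 0 then (l.length : Int) else max ((l.length : Int) - f - 1) L) := by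
  unfold pvSpecState
  rw [hh, hl]
  rfl

lemma pvSpecState_nil (l : List Int) (hO : pvOddIdx l 0 = []) :
    pvSpecState l = (l.sum % 2, none, if l.sum % 2 = 0 then (l.length : Int) else 0) := by
  unfold pvSpecState
  rw [hO]
  rfl

lemma pvLoop_char (l : List Int) : pvLoop l 1 (0, none, 0) = pvSpecState l := by
  induction l using List.reverseRecOn with
  | nil => simp [pvLoop, pvSpecState, pvOddIdx]
  | append_singleton l x ih =>
    rw [pvLoop_append, ih]
    have hb := pvOddIdx_bounds l 0
    have hn : (0 : Int) ≤ (l.length : Int) := by positivity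
    have hx2 : x % 2 = 0 ∨ x % 2 = 1 := by omega
    have hlen : (((l ++ [x]).length : Nat) : Int) = (l.length : Int) + 1 := by simp
    have hsum : (l ++ [x]).sum = l.sum + x := by simp
    by_cases hO : pvOddIdx l 0 = []
    · have hs : l.sum % 2 = 0 := pvOddIdx_nil_sum l 0 hO
      rcases hx2 with hx | hx
      · have hO' : pvOddIdx (l ++ [x]) 0 = [] := by
          rw [pvOddIdx_append, hO]
          simp [hx]
        rw [pvSpecState_nil l hO, pvSpecState_nil _ hO']
        simp only [pvStep, hsum, hlen]
        rw [if_pos (show (l.sum % 2 + x) % 2 = 0 by omega), if_pos hs,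
          if_pos (show (l.sum + x) % 2 = 0 by omega)]
        simp only [Prod.mk.injEq, Option.some.injEq]
        and_intros <;> first | trivial | omega
      · have hO' : pvOddIdx (l ++ [x]) 0 = [(l.length : Int)] := by
          rw [pvOddIdx_append, hO]
          simp [hx]
        have hh' : (pvOddIdx (l ++ [x]) 0).head? = some (l.length : Int) := by rw [hO']; rfl
        have hl' : (pvOddIdx (l ++ [x]) 0).getLast? = some (l.length : Int) := by rw [hO']; rfl
        rw [pvSpecState_nil l hO, pvSpecState_cons _ _ _ hh' hl']
        simp only [pvStep, hsum, hlen]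
        rw [if_neg (show ¬(l.sum % 2 + x) % 2 = 0 by omega), if_pos hs,
          if_neg (show ¬(l.sum + x) % 2 = 0 by omega)]
        simp only [Prod.mk.injEq, Option.some.injEq]
        and_intros <;> first | trivial | omega
    · obtain ⟨f, t, hft⟩ := List.exists_cons_of_ne_nil hO
      have hh : (pvOddIdx l 0).head? = some f := by rw [hft]; rfl
      have hf0 : (0 : Int) ≤ f := by
        have := hb f (by rw [hft]; exact List.mem_cons_self ..)
        omega
      cases hL : (pvOddIdx l 0).getLast? with
      | none => exact absurd (List.getLast?_eq_none_iff.mp hL) hO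
      | some L =>
        have hLb : L < (l.length : Int) := by
          have := hb L (List.mem_of_getLast? hL)
          omega
        rw [pvSpecState_cons l f L hh hL]
        rcases hx2 with hx | hx
        · have hO' : pvOddIdx (l ++ [x]) 0 = pvOddIdx l 0 := by
            rw [pvOddIdx_append]
            simp [hx]
          have hh' : (pvOddIdx (l ++ [x]) 0).head? = some f := by rw [hO', hh]
          have hl' : (pvOddIdx (l ++ [x]) 0).getLast? = some L := by rw [hO', hL]
          rw [pvSpecState_cons _ _ _ hh' hl']
          simp only [pvStep, hsum, hlen]
          by_cases hs : l.sum % 2 = 0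
          · rw [if_pos (show (l.sum % 2 + x) % 2 = 0 by omega), if_pos hs,
              if_pos (show (l.sum + x) % 2 = 0 by omega)]
            simp only [Prod.mk.injEq, Option.some.injEq]
            and_intros <;> first | trivial | omega
          · rw [if_neg (show ¬(l.sum % 2 + x) % 2 = 0 by omega), if_neg hs,
              if_neg (show ¬(l.sum + x) % 2 = 0 by omega)]
            simp only [Prod.mk.injEq, Option.some.injEq]
            and_intros <;> first | trivial | omega
        · have hO' : pvOddIdx (l ++ [x]) 0 = (f :: t) ++ [(l.length : Int)] := by
            rw [pvOddIdx_append, hft]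
            simp [hx]
          have hh' : (pvOddIdx (l ++ [x]) 0).head? = some f := by
            rw [hO', List.cons_append, List.head?_cons]
          have hl' : (pvOddIdx (l ++ [x]) 0).getLast? = some (l.length : Int) := by
            rw [hO']
            exact List.getLast?_concat
          rw [pvSpecState_cons _ _ _ hh' hl']
          simp only [pvStep, hsum, hlen]
          by_cases hs : l.sum % 2 = 0
          · rw [if_neg (show ¬(l.sum % 2 + x) % 2 = 0 by omega), if_pos hs,
              if_neg (show ¬(l.sum + x) % 2 = 0 by omega)]
            simp only [Prod.mk.injEq, Option.some.injEq]
            and_intros <;> first | trivial | omega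
          · rw [if_pos (show (l.sum % 2 + x) % 2 = 0 by omega), if_neg hs,
              if_pos (show (l.sum + x) % 2 = 0 by omega)]
            simp only [Prod.mk.injEq, Option.some.injEq]
            and_intros <;> first | trivial | omega

lemma pvBridge (l : List Int) (i0 p a : Int) (o : Option Int) :
    l.foldl
      (fun (st : Int × PySem.Dict Int Int × Int × Int) x =>
        if st.2.1.contains (PySem.Int.mod (st.1 + x) 2) then
          (PySem.Int.mod (st.1 + x) 2, st.2.1,
            max st.2.2.1 (st.2.2.2 + 1 - st.2.1.getD (PySem.Int.mod (st.1 + x) 2) 0), st.2.2.2 + 1)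
        else
          (PySem.Int.mod (st.1 + x) 2, st.2.1.insert (PySem.Int.mod (st.1 + x) 2) (st.2.2.2 + 1),
            st.2.2.1, st.2.2.2 + 1))
      (p, pvDictOf o, a, i0)
    = ((pvLoop l (i0 + 1) (p, o, a)).1,
       pvDictOf (pvLoop l (i0 + 1) (p, o, a)).2.1,
       (pvLoop l (i0 + 1) (p, o, a)).2.2,
       i0 + (l.length : Int)) := by
  induction l generalizing i0 p a o with
  | nil => simp [pvLoop]
  | cons x r ih =>
    have hm : PySem.Int.mod (p + x) 2 = (p + x) % 2 := pvmod2 _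
    rcases (show (p + x) % 2 = 0 ∨ (p + x) % 2 = 1 by omega) with hq | hq
    · have hc : (pvDictOf o).contains (0 : Int) = true := by
        cases o <;> simp [pvDictOf, PySem.Dict.contains_insert]
      have hg : (pvDictOf o).getD (0 : Int) 0 = 0 := by
        cases o <;> simp [pvDictOf, PySem.Dict.getD_insert]  -- getD_insert needed in the some-case
      simp only [List.foldl_cons, pvLoop, pvStep, hm, hq, hc, if_true, hg, sub_zero]
      rw [ih]
      simp only [Prod.mk.injEq, List.length_cons]
      and_intros <;> first | rfl | (push_cast; try ring)
    · cases o with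
      | some m =>
        have hc : (pvDictOf (some m)).contains (1 : Int) = true := by
          simp [pvDictOf]
        have hg : (pvDictOf (some m)).getD (1 : Int) 0 = m := by
          simp [pvDictOf, PySem.Dict.getD_insert]  -- symbolic value under a literal key
        simp only [List.foldl_cons, pvLoop, pvStep, hm, hq, hc, if_true, hg,
          if_neg (by norm_num : ¬(1 : Int) = 0)]
        rw [ih]
        simp only [Prod.mk.injEq, List.length_cons]
        and_intros <;> first | rfl | (push_cast; try ring)
      | none =>
        have hc : (pvDictOf none).contains (1 : Int) = false := by
          simp [pvDictOf, PySem.Dict.contains_insert]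
        have hd : (pvDictOf none).insert (1 : Int) (i0 + 1) = pvDictOf (some (i0 + 1)) := rfl
        simp only [List.foldl_cons, pvLoop, pvStep, hm, hq, hc, Bool.false_eq_true, if_false,
          if_neg (by norm_num : ¬(1 : Int) = 0), hd]
        rw [ih]
        simp only [Prod.mk.injEq, List.length_cons]
        and_intros <;> first | rfl | (push_cast; try ring)

lemma pvAlt_eq (arr : List Int) : largest_even_sum_subarray_alt arr = (pvSpecState arr).2.2 := by
  unfold largest_even_sum_subarray_alt
  have h0 : (PySem.Dict.empty.insert 0 0 : PySem.Dict Int Int) = pvDictOf none := rfl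
  simp only [h0]
  rw [show ((0 : Int), pvDictOf none, (0 : Int), (0 : Int))
        = ((0 : Int), pvDictOf none, (0 : Int), (0 : Int)) from rfl]
  rw [pvBridge arr 0 0 0 none]
  simp only [zero_add]
  rw [pvLoop_char]

lemma pvFoldl_sum (l : List Int) : l.foldl (· + ·) 0 = l.sum := by
  simp [List.sum_eq_foldl]

-- ===== VERDICT (by name: the statement is the Claim_ definition above) =====
theorem largest_even_sum_subarray_spec : Claim_equal_largest_even_sum_subarray := by
  intro arr _
  show largest_even_sum_subarray arr = largest_even_sum_subarray_alt arr
  rw [pvAlt_eq]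
  unfold largest_even_sum_subarray pvSpecState
  simp only [pvFoldl_sum, pvmod2]
  simp only [pvOddIdx_eq_port]
  by_cases hs : arr.sum % 2 = 0
  · simp [hs]
  · rw [if_neg hs, if_neg hs]
    have hO : pvOddIdx arr 0 ≠ [] := by
      intro h; exact hs (pvOddIdx_nil_sum arr 0 h)
    obtain ⟨f, t, hft⟩ := List.exists_cons_of_ne_nil hO
    cases hL : (pvOddIdx arr 0).getLast? with
    | none => exact absurd (List.getLast?_eq_none_iff.mp hL) hO
    | some L =>
      rw [hft] at hL ⊢
      have hlen : (f :: t).length ≠ 0 := by simp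
      rw [if_neg hlen]
      simp only [List.head?_cons, List.headD_cons]
      have hLD : (f :: t).getLastD 0 = L := by
        rw [List.getLastD_eq_getLast?, hL]; rfl
      rw [hLD]
      omega
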